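-- pv_equiv track=rewrite | github.com/queelius/computational-explorations | src/ramsey_attacks.py | coprime_graph_adjacency
-- ===== SOURCE A (Python) =====
-- import math
-- from typing import Dict, List, Optional, Set, Tuple
--
-- def coprime_graph_adjacency(n: int) -> Dict[int, Set[int]]:
--     """Adjacency dict for the coprime graph on [n]."""
--     adj: Dict[int, Set[int]] = {v: set() for v in range(1, n + 1)}
--     for i in range(1, n + 1):
--         for j in range(i + 1, n + 1):
--             if math.gcd(i, j) == 1:
--                 adj[i].add(j)
--                 adj[j].add(i)
--     return adj
-- ===== SOURCE B (Python) =====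
-- def coprime_graph_adjacency(n: int):
--     """Adjacency dict for the coprime graph on [n].
--
--     Divisor-sieve re-implementation: for each vertex v, mark every multiple
--     (up to n) of every nontrivial divisor of v; the unmarked vertices (other than
--     v itself) are exactly the neighbours of v.  No per-pair gcd is computed.
--     """
--     adj = {}
--     for v in range(1, n + 1):
--         mark = [False] * (n + 1)
--         for d in range(2, v + 1):
--             if v % d == 0:
--                 for m in range(d, n + 1, d):
--                     mark[m] = True
--         adj[v] = {u for u in range(1, n + 1) if u != v and not mark[u]}
--     return adj
-- ===== Notes on version B (the rewrite author's own statement) =====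
-- stated objective: alternative
-- what changed: Replaces the pairwise gcd test over all ordered pairs with symmetric set insertions by a per-vertex divisor sieve: for each vertex v it marks every multiple (up to n) of every nontrivial divisor of v in a boolean array and takes the unmarked vertices as v's row, computing no gcd at all.
import Mathlib
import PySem

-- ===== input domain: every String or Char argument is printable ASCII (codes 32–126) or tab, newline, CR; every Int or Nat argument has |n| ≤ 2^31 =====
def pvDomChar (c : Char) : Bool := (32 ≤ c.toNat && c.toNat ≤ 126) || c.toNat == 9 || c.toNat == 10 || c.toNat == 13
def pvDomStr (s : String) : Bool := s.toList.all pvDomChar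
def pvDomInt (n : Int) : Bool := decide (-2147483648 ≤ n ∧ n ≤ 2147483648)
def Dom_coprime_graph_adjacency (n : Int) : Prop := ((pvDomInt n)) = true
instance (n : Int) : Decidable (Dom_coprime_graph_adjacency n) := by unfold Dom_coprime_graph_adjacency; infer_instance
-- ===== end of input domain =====

-- B replaces the per-pair gcd scan by a per-vertex divisor sieve (mark multiples of each
-- divisor of v, neighbours are the unmarked vertices): an alternative algorithm, same result.

-- ===== PORT A =====
def coprime_graph_adjacency (n : Int) : List (Int × List Int) :=
  let adj0 : PySem.Dict Int (PySem.Set Int) :=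
    (PySem.List.pyRange 1 (n+1) 1).foldl (fun d v => d.insert v PySem.Set.empty) PySem.Dict.empty
  let adj :=
    (PySem.List.pyRange 1 (n+1) 1).foldl (fun d i =>
      (PySem.List.pyRange (i+1) (n+1) 1).foldl (fun d j =>
        if Int.gcd i j = 1 then
          (d.modify i PySem.Set.empty (fun s => s.add j)).modify j PySem.Set.empty (fun s => s.add i)
        else d) d) adj0
  adj.items

-- ===== PORT B =====
def coprime_graph_adjacency_alt (n : Int) : List (Int × List Int) :=
  ((PySem.List.pyRange 1 (n+1) 1).foldl (fun d v =>
    let mark : List Bool :=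
      (PySem.List.pyRange 2 (v+1) 1).foldl (fun mk dd =>
        if PySem.Int.mod v dd = 0 then
          (PySem.List.pyRange dd (n+1) dd).foldl (fun mk m => PySem.List.pySetD mk m true) mk
        else mk) (List.replicate (n+1).toNat false)
    d.insert v (PySem.Set.ofList ((PySem.List.pyRange 1 (n+1) 1).filter
      (fun u => u != v && !(PySem.List.pyGetD mark u false))))) PySem.Dict.empty).items

-- ===== PRECONDITION & SPEC =====
def Spec_coprime_graph_adjacency (n : Int) (out : List (Int × List Int)) : Prop := out = coprime_graph_adjacency_alt n
instance (n : Int) (out : List (Int × List Int)) : Decidable (Spec_coprime_graph_adjacency n out) := by unfold Spec_coprime_graph_adjacency; infer_instance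

-- ===== CLAIM (what is proved, stated in full; the proofs are below) =====
def Claim_equal_coprime_graph_adjacency : Prop := ∀ (n : Int), Dom_coprime_graph_adjacency n → Spec_coprime_graph_adjacency n (coprime_graph_adjacency n)

-- ===== LEMMAS AND PROOFS =====

-- Python % (fmod) agrees with emod for a positive divisor
theorem pvMod_eq_emod (v d : Int) (h : 0 < d) : PySem.Int.mod v d = v % d := by
  show v.fmod d = v % d
  rw [Int.fmod_eq_emod]
  have : ¬ (d < 0) := by omega
  simp [this]

theorem pvMod_eq_zero_iff (v d : Int) (h : 0 < d) : (PySem.Int.mod v d = 0) ↔ d ∣ v := by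
  rw [pvMod_eq_emod v d h]
  exact (Int.dvd_iff_emod_eq_zero).symm

-- gcd(u,v) ≠ 1 iff u and v have a common divisor d with 2 ≤ d ≤ v  (u, v ≥ 1)
theorem pvGcd_ne_one_iff (u v : Int) (hu : 1 ≤ u) (hv : 1 ≤ v) :
    ((PySem.List.pyRange 2 (v+1) 1).any (fun d => decide (d ∣ v) && decide (d ∣ u)) = true)
      ↔ ¬ Int.gcd u v = 1 := by
  simp only [List.any_eq_true, Bool.and_eq_true, decide_eq_true_eq, PySem.List.mem_pyRange_one]
  constructor
  · rintro ⟨d, ⟨h2, hlt⟩, hdv, hdu⟩ hg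
    obtain ⟨x, y, hxy⟩ := Int.isCoprime_iff_gcd_eq_one.mpr hg
    have hd1 : d ∣ 1 := by
      rw [← hxy]
      exact dvd_add (Dvd.dvd.mul_left hdu x) (Dvd.dvd.mul_left hdv y)
    have := Int.le_of_dvd one_pos hd1
    omega
  · intro hg
    have hg0 : Int.gcd u v ≠ 0 := by
      intro h0
      have := Int.gcd_eq_zero_iff.mp h0
      omega
    refine ⟨(Int.gcd u v : Int), ⟨?_, ?_⟩, Int.gcd_dvd_right u v, Int.gcd_dvd_left u v⟩
    · have : 2 ≤ Int.gcd u v := by omega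
      exact_mod_cast this
    · have := Int.le_of_dvd (by omega) (Int.gcd_dvd_right u v)
      omega

-- the canonical row: increasing list of neighbours of v
def pvRow (n v : Int) : List Int :=
  (PySem.List.pyRange 1 (n+1) 1).filter (fun u => decide (u ≠ v) && decide (Int.gcd u v = 1))

-- ---------- A side ----------

def pvG (d : PySem.Dict Int (PySem.Set Int)) (p : Int × Int) : PySem.Dict Int (PySem.Set Int) :=
  (d.modify p.1 PySem.Set.empty (fun s => s.add p.2)).modify p.2 PySem.Set.empty (fun s => s.add p.1)

def pvAdj0 (n : Int) : PySem.Dict Int (PySem.Set Int) :=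
  (PySem.List.pyRange 1 (n+1) 1).foldl (fun d v => d.insert v PySem.Set.empty) PySem.Dict.empty

def pvPairs (n : Int) : List (Int × Int) :=
  (PySem.List.pyRange 1 (n+1) 1).flatMap (fun i => (PySem.List.pyRange (i+1) (n+1) 1).map (fun j => (i, j)))

def pvPairsC (n : Int) : List (Int × Int) :=
  (pvPairs n).filter (fun p => decide (Int.gcd p.1 p.2 = 1))

def pvContrib (v : Int) (p : Int × Int) : List Int :=
  (if p.1 = v then [p.2] else []) ++ (if p.2 = v then [p.1] else [])

theorem pvA_eq_pairfold (n : Int) :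
    coprime_graph_adjacency n = ((pvPairsC n).foldl pvG (pvAdj0 n)).items := by
  show (((PySem.List.pyRange 1 (n+1) 1).foldl (fun d i =>
      (PySem.List.pyRange (i+1) (n+1) 1).foldl (fun d j =>
        if Int.gcd i j = 1 then
          (d.modify i PySem.Set.empty (fun s => s.add j)).modify j PySem.Set.empty (fun s => s.add i)
        else d) d) (pvAdj0 n)).items) = _
  have h1 : (fun (d : PySem.Dict Int (PySem.Set Int)) (i : Int) =>
      (PySem.List.pyRange (i+1) (n+1) 1).foldl (fun d j =>
        if Int.gcd i j = 1 then
          (d.modify i PySem.Set.empty (fun s => s.add j)).modify j PySem.Set.empty (fun s => s.add i)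
        else d) d)
      = (fun d i => ((PySem.List.pyRange (i+1) (n+1) 1).map (fun j => (i, j))).foldl
          (fun d p => if Int.gcd p.1 p.2 = 1 then pvG d p else d) d) := by
    funext d i
    exact (List.foldl_map (f := fun j => (i, j))
      (g := fun d p => if Int.gcd p.1 p.2 = 1 then pvG d p else d)).symm
  rw [h1, ← List.foldl_flatMap]
  rw [show (PySem.List.pyRange 1 (n+1) 1).flatMap
        (fun i => (PySem.List.pyRange (i+1) (n+1) 1).map (fun j => (i, j))) = pvPairs n from rfl]
  rw [PySem.List.foldl_ite_eq_foldl_filter (p := fun p : Int × Int => Int.gcd p.1 p.2 = 1) pvG]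
  rfl

theorem pvAdj0_items (n : Int) :
    (pvAdj0 n).items = (PySem.List.pyRange 1 (n+1) 1).map (fun v => (v, (PySem.Set.empty : PySem.Set Int))) := by
  have := PySem.Dict.items_foldl_insert_fresh (PySem.List.pyRange 1 (n+1) 1)
      (fun a => a) (fun _ => (PySem.Set.empty : PySem.Set Int)) PySem.Dict.empty
      (fun a _ => PySem.Dict.contains_empty a)
      (by simpa using PySem.List.nodup_pyRange_one 1 (n+1))
  simpa [pvAdj0] using this

theorem pvAdj0_keys (n : Int) : (pvAdj0 n).keys = PySem.List.pyRange 1 (n+1) 1 := by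
  have h := pvAdj0_items n
  simp only [PySem.Dict.keys, h, List.map_map]
  simp [Function.comp_def]

theorem pvAdj0_getD (n v : Int) : (pvAdj0 n).getD v PySem.Set.empty = PySem.Set.empty := by
  by_cases h : v ∈ PySem.List.pyRange 1 (n+1) 1
  · have hm : (v, (PySem.Set.empty : PySem.Set Int)) ∈ (pvAdj0 n).items := by
      rw [pvAdj0_items]; exact List.mem_map.mpr ⟨v, h, rfl⟩
    have hnd : (pvAdj0 n).keys.Nodup := by
      rw [pvAdj0_keys]; exact PySem.List.nodup_pyRange_one 1 (n+1)
    exact PySem.Dict.getD_of_mem_items _ hm hnd _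
  · apply PySem.Dict.getD_of_not_contains
    rw [Bool.eq_false_iff]
    intro hc
    exact h (by rwa [PySem.Dict.contains_iff_mem_keys, pvAdj0_keys] at hc)

-- keys are preserved by the update fold
theorem pvG_fold_keys (ps : List (Int × Int)) (d : PySem.Dict Int (PySem.Set Int))
    (h : ∀ p ∈ ps, p.1 ∈ d.keys ∧ p.2 ∈ d.keys) :
    (ps.foldl pvG d).keys = d.keys := by
  induction ps generalizing d with
  | nil => rfl
  | cons p t ih =>
    have hp := h p (List.mem_cons_self)
    have hk1 : (d.modify p.1 PySem.Set.empty (fun s => s.add p.2)).keys = d.keys := by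
      rw [PySem.Dict.keys_modify]
      exact PySem.Dict.keys_insert_of_contains _ _
        ((PySem.Dict.contains_iff_mem_keys _ _).mpr hp.1)
    have hkG : (pvG d p).keys = d.keys := by
      unfold pvG
      rw [PySem.Dict.keys_modify]
      rw [PySem.Dict.keys_insert_of_contains _ _
        ((PySem.Dict.contains_iff_mem_keys _ _).mpr (hk1 ▸ hp.2))]
      exact hk1
    rw [List.foldl_cons, ih (pvG d p) (fun q hq => by
      rw [hkG]; exact h q (List.mem_cons_of_mem _ hq)), hkG]

-- the value at key v after the update fold
theorem pvG_fold_getD (ps : List (Int × Int)) (d : PySem.Dict Int (PySem.Set Int)) (v : Int) :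
    ((ps.foldl pvG d).getD v PySem.Set.empty)
      = (ps.flatMap (pvContrib v)).foldl PySem.Set.add (d.getD v PySem.Set.empty) := by
  induction ps generalizing d with
  | nil => rfl
  | cons p t ih =>
    have hstep : (pvG d p).getD v PySem.Set.empty
        = (pvContrib v p).foldl PySem.Set.add (d.getD v PySem.Set.empty) := by
      unfold pvG pvContrib
      rcases eq_or_ne p.1 v with h1 | h1 <;> rcases eq_or_ne p.2 v with h2 | h2
      · simp [PySem.Set.add, h1, h2]
      · simp [PySem.Dict.getD_modify, PySem.Set.add, h1, h2, h2.symm]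
      · simp [PySem.Dict.getD_modify, PySem.Set.add, h1, h1.symm, h2]
      · simp [PySem.Dict.getD_modify, PySem.Set.add, h1, h1.symm, h2, h2.symm]
    rw [List.foldl_cons, ih (pvG d p), hstep, List.flatMap_cons, List.foldl_append]

theorem pvPairs_mem (n : Int) (p : Int × Int) :
    p ∈ pvPairs n ↔ 1 ≤ p.1 ∧ p.1 < p.2 ∧ p.2 ≤ n := by
  simp only [pvPairs, List.mem_flatMap, List.mem_map, PySem.List.mem_pyRange_one]
  constructor
  · rintro ⟨i, ⟨hi1, hin⟩, j, ⟨hj1, hjn⟩, rfl⟩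
    exact ⟨hi1, by omega, by omega⟩
  · rintro ⟨h1, h2, h3⟩
    exact ⟨p.1, ⟨h1, by omega⟩, p.2, ⟨by omega, by omega⟩, rfl⟩

-- flatMap of a delta function over a nodup list containing v
theorem pvFlatMap_delta {β : Type} (l : List Int) (v : Int) (c : List β)
    (hnd : l.Nodup) (hv : v ∈ l) :
    l.flatMap (fun j => if j = v then c else []) = c := by
  induction l with
  | nil => cases hv
  | cons a t ih =>
    rcases List.mem_cons.mp hv with h | h
    · subst h
      have hnotin : v ∉ t := (List.nodup_cons.mp hnd).1
      have ht : t.flatMap (fun j => if j = v then c else []) = [] := by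
        apply List.flatMap_eq_nil_iff.mpr
        intro j hj
        have : j ≠ v := fun he => hnotin (he ▸ hj)
        simp [this]
      simp [List.flatMap_cons, ht]
    · have ha : a ≠ v := by
        rintro rfl; exact (List.nodup_cons.mp hnd).1 h
      simp only [List.flatMap_cons, if_neg ha, List.nil_append]
      exact ih (List.nodup_cons.mp hnd).2 h

theorem pvFlatMap_if_singleton (l : List Int) (p : Int → Prop) [DecidablePred p] :
    l.flatMap (fun i => if p i then [i] else []) = l.filter (fun i => decide (p i)) := by
  induction l with
  | nil => rfl
  | cons a t ih =>
    by_cases h : p a <;> simp [h, ih]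

-- flatMap after filter, fused
theorem pvFlatMap_filter {β : Type} (l : List (Int × Int)) (q : Int × Int → Bool)
    (f : Int × Int → List β) :
    (l.filter q).flatMap f = l.flatMap (fun p => if q p then f p else []) := by
  induction l with
  | nil => rfl
  | cons a t ih =>
    by_cases h : q a <;> simp [h, ih]

-- the A-side contribution sequence for v is exactly the canonical row
theorem pvContribs_eq_row (n v : Int) (hv1 : 1 ≤ v) (hvn : v ≤ n) :
    (pvPairsC n).flatMap (pvContrib v) = pvRow n v := by
  have hq : pvPairsC n = (pvPairs n).filter (fun p => decide (Int.gcd p.1 p.2 = 1)) := rfl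
  rw [hq, pvFlatMap_filter, pvPairs, List.flatMap_assoc]
  have hsplit : PySem.List.pyRange 1 (n+1) 1
      = PySem.List.pyRange 1 v 1 ++ PySem.List.pyRange v (v+1) 1 ++ PySem.List.pyRange (v+1) (n+1) 1 := by
    rw [← PySem.List.pyRange_one_append 1 v (v+1) (by omega) (by omega)]
    rw [← PySem.List.pyRange_one_append 1 (v+1) (n+1) (by omega) (by omega)]
  rw [hsplit, List.flatMap_append, List.flatMap_append]
  unfold pvRow
  rw [hsplit, List.filter_append, List.filter_append]
  -- segment 1 : i < v
  have hseg1 : (PySem.List.pyRange 1 v 1).flatMap (fun i =>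
        ((PySem.List.pyRange (i+1) (n+1) 1).map (fun j => (i, j))).flatMap
          (fun p => if decide (Int.gcd p.1 p.2 = 1) = true then pvContrib v p else []))
      = (PySem.List.pyRange 1 v 1).filter (fun u => decide (u ≠ v) && decide (Int.gcd u v = 1)) := by
    have hptw : ∀ i ∈ PySem.List.pyRange 1 v 1,
        ((PySem.List.pyRange (i+1) (n+1) 1).map (fun j => (i, j))).flatMap
          (fun p => if decide (Int.gcd p.1 p.2 = 1) = true then pvContrib v p else [])
        = if Int.gcd i v = 1 then [i] else [] := by
      intro i hi
      obtain ⟨hi1, hiv⟩ := PySem.List.mem_pyRange_one.mp hi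
      rw [List.flatMap_map]
      have hcong : ∀ j ∈ PySem.List.pyRange (i+1) (n+1) 1,
          (fun j => if decide (Int.gcd (i, j).1 (i, j).2 = 1) = true then pvContrib v (i, j) else []) j
          = (fun j => if j = v then (if Int.gcd i v = 1 then [i] else []) else []) j := by
        intro j _
        have hne : ¬ i = v := by omega
        simp only [pvContrib]
        split_ifs <;> simp_all
      rw [List.flatMap_congr hcong]
      exact pvFlatMap_delta _ v _ (PySem.List.nodup_pyRange_one _ _)
        (PySem.List.mem_pyRange_one.mpr ⟨by omega, by omega⟩)
    rw [List.flatMap_congr hptw, pvFlatMap_if_singleton _ (fun i => Int.gcd i v = 1)]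
    apply List.filter_congr
    intro u hu
    obtain ⟨hu1, huv⟩ := PySem.List.mem_pyRange_one.mp hu
    simp
    intro _
    omega
  -- segment 2 : i = v
  have hseg2 : (PySem.List.pyRange v (v+1) 1).flatMap (fun i =>
        ((PySem.List.pyRange (i+1) (n+1) 1).map (fun j => (i, j))).flatMap
          (fun p => if decide (Int.gcd p.1 p.2 = 1) = true then pvContrib v p else []))
      = (PySem.List.pyRange (v+1) (n+1) 1).filter (fun u => decide (u ≠ v) && decide (Int.gcd u v = 1)) := by
    rw [PySem.List.pyRange_one_singleton, List.flatMap_singleton, List.flatMap_map]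
    have hcong : ∀ j ∈ PySem.List.pyRange (v+1) (n+1) 1,
        (fun j => if decide (Int.gcd (v, j).1 (v, j).2 = 1) = true then pvContrib v (v, j) else []) j
        = (fun j => if Int.gcd j v = 1 then [j] else []) j := by
      intro j hj
      obtain ⟨hj1, hjn⟩ := PySem.List.mem_pyRange_one.mp hj
      have hne : ¬ j = v := by omega
      have hcomm : Int.gcd j v = Int.gcd v j := Int.gcd_comm j v
      simp only [pvContrib]
      split_ifs <;> simp_all
    rw [List.flatMap_congr hcong, pvFlatMap_if_singleton _ (fun j => Int.gcd j v = 1)]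
    apply List.filter_congr
    intro u hu
    obtain ⟨hu1, hun⟩ := PySem.List.mem_pyRange_one.mp hu
    simp
    intro _
    omega
  -- segment 3 : i > v
  have hseg3 : (PySem.List.pyRange (v+1) (n+1) 1).flatMap (fun i =>
        ((PySem.List.pyRange (i+1) (n+1) 1).map (fun j => (i, j))).flatMap
          (fun p => if decide (Int.gcd p.1 p.2 = 1) = true then pvContrib v p else []))
      = [] := by
    apply List.flatMap_eq_nil_iff.mpr
    intro i hi
    obtain ⟨hi1, hin⟩ := PySem.List.mem_pyRange_one.mp hi
    rw [List.flatMap_map]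
    apply List.flatMap_eq_nil_iff.mpr
    intro j hj
    obtain ⟨hj1, hjn⟩ := PySem.List.mem_pyRange_one.mp hj
    have hne1 : ¬ i = v := by omega
    have hne2 : ¬ j = v := by omega
    simp only [pvContrib]
    split_ifs <;> simp_all
  rw [hseg1, hseg2, hseg3]
  have hmid : (PySem.List.pyRange v (v+1) 1).filter
      (fun u => decide (u ≠ v) && decide (Int.gcd u v = 1)) = [] := by
    rw [PySem.List.pyRange_one_singleton]
    simp
  rw [hmid]
  simp

-- ---------- B side ----------

def pvMark (n v : Int) : List Bool :=
  (PySem.List.pyRange 2 (v+1) 1).foldl (fun mk dd =>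
    if PySem.Int.mod v dd = 0 then
      (PySem.List.pyRange dd (n+1) dd).foldl (fun mk m => PySem.List.pySetD mk m true) mk
    else mk) (List.replicate (n+1).toNat false)

def pvRowB (n v : Int) : PySem.Set Int :=
  PySem.Set.ofList ((PySem.List.pyRange 1 (n+1) 1).filter
    (fun u => u != v && !(PySem.List.pyGetD (pvMark n v) u false)))

theorem pvB_eq_mapfold (n : Int) :
    coprime_graph_adjacency_alt n
      = (((PySem.List.pyRange 1 (n+1) 1).foldl (fun d v => d.insert v (pvRowB n v)) PySem.Dict.empty)).items := by
  rfl

theorem pvB_items (n : Int) :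
    coprime_graph_adjacency_alt n = (PySem.List.pyRange 1 (n+1) 1).map (fun v => (v, pvRowB n v)) := by
  rw [pvB_eq_mapfold]
  have := PySem.Dict.items_foldl_insert_fresh (PySem.List.pyRange 1 (n+1) 1)
      (fun a => a) (pvRowB n) PySem.Dict.empty
      (fun a _ => PySem.Dict.contains_empty a)
      (by simpa using PySem.List.nodup_pyRange_one 1 (n+1))
  simpa using this

theorem pvSetFold_length (ms : List Int) (mk : List Bool) :
    (ms.foldl (fun a m => PySem.List.pySetD a m true) mk).length = mk.length := by
  induction ms generalizing mk with
  | nil => rfl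
  | cons m t ih => simp [List.foldl_cons, ih, PySem.List.length_pySetD]

-- the inner marking loop: positions in ms are set to true
theorem pvSetFold_getD (ms : List Int) :
    ∀ (mk : List Bool) (u : Int), 0 ≤ u → (u : Int) < mk.length →
    (∀ m ∈ ms, 0 ≤ m ∧ (m : Int) < mk.length) →
    PySem.List.pyGetD (ms.foldl (fun a m => PySem.List.pySetD a m true) mk) u false
      = (PySem.List.pyGetD mk u false || decide (u ∈ ms)) := by
  induction ms with
  | nil => intro mk u _ _ _; simp
  | cons m t ih =>
    intro mk u hu hulen hms
    obtain ⟨hm0, hmlen⟩ := hms m List.mem_cons_self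
    have hstep : PySem.List.pyGetD (PySem.List.pySetD mk m true) u false
        = (if u = m then true else PySem.List.pyGetD mk u false) := by
      rw [PySem.List.pySetD_of_nonneg _ _ hm0, PySem.List.pyGetD_of_nonneg _ _ hu]
      by_cases he : u = m
      · have hlt : u.toNat < mk.length := by omega
        have : m.toNat = u.toNat := by omega
        rw [List.getD_eq_getElem?_getD, List.getElem?_set, this, if_pos rfl, if_pos hlt]
        simp [he]
      · have hne : m.toNat ≠ u.toNat := by omega
        rw [List.getD_eq_getElem?_getD, List.getElem?_set, if_neg hne,
          ← List.getD_eq_getElem?_getD, if_neg he, PySem.List.pyGetD_of_nonneg _ _ hu]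
    rw [List.foldl_cons, ih (PySem.List.pySetD mk m true) u hu
      (by rw [PySem.List.length_pySetD]; exact hulen)
      (fun q hq => by
        rw [PySem.List.length_pySetD]
        exact hms q (List.mem_cons_of_mem _ hq)), hstep]
    by_cases he : u = m <;> simp [he, List.mem_cons]

theorem pvMarkAux (n v u : Int) (hu1 : 1 ≤ u) (hun : u ≤ n) (l : List Int)
    (hl : ∀ d ∈ l, 0 < d) :
    ∀ (mk : List Bool), (n : Int) < mk.length →
    PySem.List.pyGetD (l.foldl (fun mk dd =>
        if PySem.Int.mod v dd = 0 then
          (PySem.List.pyRange dd (n+1) dd).foldl (fun mk m => PySem.List.pySetD mk m true) mk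
        else mk) mk) u false
      = (PySem.List.pyGetD mk u false || l.any (fun d => decide (d ∣ v) && decide (d ∣ u))) := by
  induction l with
  | nil => intro mk _; simp
  | cons dd t ih =>
    intro mk hlen
    have hdd : 0 < dd := hl dd List.mem_cons_self
    have hmem : u ∈ PySem.List.pyRange dd (n+1) dd ↔ dd ∣ u := by
      rw [PySem.List.mem_pyRange_iff_of_pos hdd]
      constructor
      · rintro ⟨-, -, hdvd⟩
        have := dvd_add hdvd (dvd_refl dd)
        simpa using this
      · intro hdvd
        refine ⟨Int.le_of_dvd (by omega) hdvd, by omega, ?_⟩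
        exact dvd_sub hdvd (dvd_refl dd)
    have ht : ∀ d ∈ t, 0 < d := fun d hd => hl d (List.mem_cons_of_mem _ hd)
    rw [List.foldl_cons]
    by_cases hmod : PySem.Int.mod v dd = 0
    · rw [if_pos hmod]
      have hstep := pvSetFold_getD (PySem.List.pyRange dd (n+1) dd) mk u (by omega)
        (by omega)
        (fun m hm => by
          obtain ⟨h1, h2, -⟩ := (PySem.List.mem_pyRange_iff_of_pos hdd m).mp hm
          exact ⟨by omega, by omega⟩)
      rw [ih ht _ (by rw [pvSetFold_length]; exact hlen), hstep]
      have hdv : dd ∣ v := (pvMod_eq_zero_iff v dd hdd).mp hmod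
      simp [List.any_cons, hdv, hmem, Bool.or_assoc]
    · rw [if_neg hmod]
      rw [ih ht _ hlen]
      have hndv : ¬ dd ∣ v := fun h => hmod ((pvMod_eq_zero_iff v dd hdd).mpr h)
      simp [List.any_cons, hndv]

theorem pvMark_getD (n v u : Int) (hu1 : 1 ≤ u) (hun : u ≤ n) :
    PySem.List.pyGetD (pvMark n v) u false
      = (PySem.List.pyRange 2 (v+1) 1).any (fun d => decide (d ∣ v) && decide (d ∣ u)) := by
  unfold pvMark
  rw [pvMarkAux n v u hu1 hun _
    (fun d hd => by
      obtain ⟨h1, -⟩ := PySem.List.mem_pyRange_one.mp hd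
      omega)
    (List.replicate (n+1).toNat false)
    (by simp [List.length_replicate])]
  have hbase : PySem.List.pyGetD (List.replicate (n+1).toNat false) u false = false := by
    rw [PySem.List.pyGetD_of_nonneg _ _ (by omega : (0:Int) ≤ u)]
    rw [List.getD_eq_getElem?_getD, List.getElem?_replicate]
    by_cases h : u.toNat < (n+1).toNat <;> simp [h]
  rw [hbase, Bool.false_or]

theorem pvRowB_eq_row (n v : Int) (hv1 : 1 ≤ v) (hvn : v ≤ n) :
    pvRowB n v = PySem.Set.ofList (pvRow n v) := by
  unfold pvRowB pvRow
  apply congrArg PySem.Set.ofList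
  apply List.filter_congr
  intro u hu
  obtain ⟨hu1, hun⟩ := PySem.List.mem_pyRange_one.mp hu
  rw [pvMark_getD n v u hu1 (by omega)]
  have h2 := pvGcd_ne_one_iff u v hu1 hv1
  have h3 : ((PySem.List.pyRange 2 (v+1) 1).any (fun d => decide (d ∣ v) && decide (d ∣ u)))
      = decide (¬ Int.gcd u v = 1) := by
    rw [Bool.eq_iff_iff, decide_eq_true_iff]
    exact h2
  rw [h3]
  by_cases hg : Int.gcd u v = 1 <;> by_cases hne : u = v <;> simp [hg, hne, bne]

-- ===== VERDICT (by name: the statement is the Claim_ definition above) =====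
theorem coprime_graph_adjacency_spec : Claim_equal_coprime_graph_adjacency := by
  intro n _
  show coprime_graph_adjacency n = coprime_graph_adjacency_alt n
  rw [pvA_eq_pairfold, pvB_items]
  have hmemkeys : ∀ p ∈ pvPairsC n, p.1 ∈ (pvAdj0 n).keys ∧ p.2 ∈ (pvAdj0 n).keys := by
    intro p hp
    have hp' : p ∈ pvPairs n := List.mem_of_mem_filter hp
    obtain ⟨h1, h2, h3⟩ := (pvPairs_mem n p).mp hp'
    rw [pvAdj0_keys]
    exact ⟨PySem.List.mem_pyRange_one.mpr ⟨by omega, by omega⟩,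
      PySem.List.mem_pyRange_one.mpr ⟨by omega, by omega⟩⟩
  have hkeys : ((pvPairsC n).foldl pvG (pvAdj0 n)).keys = PySem.List.pyRange 1 (n+1) 1 := by
    rw [pvG_fold_keys _ _ hmemkeys, pvAdj0_keys]
  have hnd : ((pvPairsC n).foldl pvG (pvAdj0 n)).keys.Nodup := by
    rw [hkeys]; exact PySem.List.nodup_pyRange_one 1 (n+1)
  rw [PySem.Dict.items_eq_map_keys _ hnd PySem.Set.empty, hkeys]
  apply List.map_congr_left
  intro v hv
  obtain ⟨hv1, hvn⟩ := PySem.List.mem_pyRange_one.mp hv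
  have : ((pvPairsC n).foldl pvG (pvAdj0 n)).getD v PySem.Set.empty = pvRowB n v := by
    rw [pvG_fold_getD, pvAdj0_getD, pvContribs_eq_row n v (by omega) (by omega),
      pvRowB_eq_row n v (by omega) (by omega)]
    exact (PySem.Set.ofList_eq_foldl _).symm
  rw [this]
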